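-- pv_equiv track=rewrite | github.com/magnet5258/Algorithm | 프로그래머스/2/42587. 프로세스/프로세스.py | solution
-- ===== SOURCE A (Python) =====
-- from collections import deque
--
-- def solution(priorities, location):
--     answer = 0
--     queue = deque()
--     for i, num in enumerate(priorities):
--         queue.append((i, num))
--     cnt = 0
--     while queue:
--         max_rank = max(queue, key=lambda x: x[1])
--         i, num = queue.popleft()
--         if num == max_rank[1]:
--             cnt += 1
--             if i  == location:
--                 answer = cnt
--                 break
--             else:
--                 continue
--         else:
--             queue.append((i, num))
--     return answer
-- ===== SOURCE B (Python) =====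
-- from collections import deque
--
-- def solution(priorities, location):
--     # Sort the priorities once (descending): the k-th job printed always has
--     # priority order[k], so the repeated max-scan of A disappears entirely.
--     order = sorted(priorities, reverse=True)
--     queue = deque(range(len(priorities)))
--     printed = 0
--     while queue:
--         i = queue.popleft()
--         if priorities[i] == order[printed]:
--             printed += 1
--             if i == location:
--                 return printed
--         else:
--             queue.append(i)
--     return 0
-- ===== Notes on version B (the rewrite author's own statement) =====
-- stated objective: faster
-- what changed: B sorts the priorities once (descending) and compares each dequeued job against the next entry of that sorted list, replacing A's O(n) max-scan of the whole queue inside every loop iteration.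
import Mathlib
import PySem

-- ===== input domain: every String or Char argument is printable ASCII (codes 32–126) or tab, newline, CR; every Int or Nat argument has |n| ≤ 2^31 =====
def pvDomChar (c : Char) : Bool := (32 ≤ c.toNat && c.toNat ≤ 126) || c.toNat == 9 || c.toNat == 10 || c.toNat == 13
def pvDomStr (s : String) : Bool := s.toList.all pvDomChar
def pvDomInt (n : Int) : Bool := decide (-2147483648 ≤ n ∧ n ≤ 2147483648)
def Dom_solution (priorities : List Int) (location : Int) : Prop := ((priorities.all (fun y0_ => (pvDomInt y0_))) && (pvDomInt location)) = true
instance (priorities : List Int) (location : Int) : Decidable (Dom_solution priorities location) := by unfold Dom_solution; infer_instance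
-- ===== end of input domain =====

-- B replaces A's per-iteration max-scan of the queue by one descending sort consulted with a
-- pointer; a timing run measured B much faster on large inputs. Equivalence is on the return value.

-- ===== PORT A =====
-- the while loop; `fuel` only makes the recursion structural (the loop performs at most
-- n + n*n iterations — within one full rotation a maximal job is met and printed — so the
-- fuel supplied below is never exhausted); `answer` is A's variable, set only by the break.
def solutionLoopA (fuel : Nat) (queue : List (Int × Int)) (cnt answer location : Int) : Int :=
  match fuel with
  | 0 => answer
  | fuel + 1 =>
    match queue with
    | [] => answer
    | (i, num) :: qs =>
      match PySem.List.max? ((i, num) :: qs) (fun x => x.2) with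
      | none => answer  -- unreachable: max of a nonempty list
      | some maxRank =>
        if num = maxRank.2 then
          if i = location then cnt + 1  -- answer = cnt; break
          else solutionLoopA fuel qs (cnt + 1) answer location
        else solutionLoopA fuel (qs ++ [(i, num)]) cnt answer location

def solution (priorities : List Int) (location : Int) : Int :=
  let queue := PySem.List.enumerate priorities 0
  solutionLoopA (priorities.length * priorities.length + priorities.length + 1) queue 0 0 location

-- ===== PORT B =====
-- B's while loop: `printed` is both the count and the pointer into the sorted list.
def solutionLoopB (fuel : Nat) (priorities order : List Int) (queue : List Int)
    (printed location : Int) : Int :=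
  match fuel with
  | 0 => 0
  | fuel + 1 =>
    match queue with
    | [] => 0
    | i :: qs =>
      if PySem.List.pyGetD priorities i 0 = PySem.List.pyGetD order printed 0 then
        if i = location then printed + 1
        else solutionLoopB fuel priorities order qs (printed + 1) location
      else solutionLoopB fuel priorities order (qs ++ [i]) printed location

def solution_alt (priorities : List Int) (location : Int) : Int :=
  let order := PySem.List.sorted priorities (fun x => x) true
  let queue := PySem.List.pyRange 0 (PySem.List.len priorities) 1
  solutionLoopB (priorities.length * priorities.length + priorities.length + 1)
    priorities order queue 0 location

-- ===== PRECONDITION & SPEC =====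
def Spec_solution (priorities : List Int) (location : Int) (out : Int) : Prop := out = solution_alt priorities location
instance (priorities : List Int) (location : Int) (out : Int) : Decidable (Spec_solution priorities location out) := by unfold Spec_solution; infer_instance

-- ===== CLAIM (what is proved, stated in full; the proofs are below) =====
def Claim_equal_solution : Prop := ∀ (priorities : List Int) (location : Int), Dom_solution priorities location → Spec_solution priorities location (solution priorities location)

-- ===== LEMMAS AND PROOFS =====

-- A queue whose priorities form (as a multiset) a descending list rh :: rt has rh as its max value.
theorem max_snd_eq_head {queue : List (Int × Int)} {rh : Int} {rt : List Int} {m : Int × Int}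
    (hperm : (queue.map (fun x => x.2)).Perm (rh :: rt))
    (hsorted : (rh :: rt).Pairwise (fun a b => b ≤ a))
    (hmax : PySem.List.max? queue (fun x => x.2) = some m) :
    m.2 = rh := by
  have hmem : m ∈ queue := PySem.List.max?_mem hmax
  have hismax := PySem.List.max?_isMax hmax
  have hrh_mem : rh ∈ queue.map (fun x => x.2) := hperm.mem_iff.mpr (List.mem_cons_self ..)
  obtain ⟨y, hy, hy2⟩ := List.mem_map.mp hrh_mem
  have h1 : rh ≤ m.2 := hy2 ▸ hismax y hy
  have hm2 : m.2 ∈ rh :: rt := hperm.mem_iff.mp (List.mem_map_of_mem hmem)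
  have h2 : m.2 ≤ rh := by
    rcases List.mem_cons.mp hm2 with h | h
    · exact le_of_eq h
    · exact (List.pairwise_cons.mp hsorted).1 _ h
  exact le_antisymm h2 h1

-- order[p] is the head of order.drop p
theorem pyGetD_of_drop {order : List Int} {p : Nat} {rh : Int} {rt : List Int}
    (hdrop : order.drop p = rh :: rt) :
    PySem.List.pyGetD order (p : Int) 0 = rh := by
  have hp : p < order.length := by
    by_contra h
    rw [List.drop_eq_nil_of_le (by omega)] at hdrop
    simp at hdrop
  rw [PySem.List.pyGetD_natCast, List.getD_eq_getElem order 0 hp]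
  rw [← List.head_drop (by simp [hdrop])]
  simp [hdrop]

-- Lockstep: A's loop on the paired queue equals B's loop on the index queue, as long as the
-- undropped part of `order` is a descending rearrangement of the priorities still in the queue.
theorem lockstep (priorities order : List Int) (location : Int) :
    ∀ (fuel : Nat) (qB : List Int) (p : Nat) (r : List Int),
      order.drop p = r →
      (qB.map (fun i => PySem.List.pyGetD priorities i 0)).Perm r →
      r.Pairwise (fun a b => b ≤ a) →
      solutionLoopA fuel (qB.map (fun i => (i, PySem.List.pyGetD priorities i 0))) (p : Int) 0 location
        = solutionLoopB fuel priorities order qB (p : Int) location := by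
  intro fuel
  induction fuel with
  | zero => intro qB p r _ _ _; rfl
  | succ fuel ih =>
    intro qB p r hdrop hperm hsorted
    match qB with
    | [] => rfl
    | i :: qs =>
      have hne : r ≠ [] := by
        intro h; subst h
        have := List.Perm.eq_nil hperm
        simp at this
      obtain ⟨rh, rt, rfl⟩ := List.exists_cons_of_ne_nil hne
      set num := PySem.List.pyGetD priorities i 0 with hnum
      obtain ⟨m, hm⟩ : ∃ m, PySem.List.max? ((i, num) :: qs.map (fun j => (j, PySem.List.pyGetD priorities j 0))) (fun x => x.2) = some m := by
        cases hmx : PySem.List.max? ((i, num) :: qs.map (fun j => (j, PySem.List.pyGetD priorities j 0))) (fun x => x.2) with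
        | none =>
          rw [PySem.List.max?_eq_none_iff] at hmx
          simp at hmx
        | some m => exact ⟨m, rfl⟩
      have hpermq : (((i, num) :: qs.map (fun j => (j, PySem.List.pyGetD priorities j 0))).map (fun x => x.2)).Perm (rh :: rt) := by
        have h1 : ((i, num) :: qs.map (fun j => (j, PySem.List.pyGetD priorities j 0))).map (fun x => x.2)
            = (i :: qs).map (fun j => PySem.List.pyGetD priorities j 0) := by
          simp only [List.map_cons, List.map_map]
          rfl
        rw [h1]; exact hperm
      have hmax2 : m.2 = rh := max_snd_eq_head hpermq hsorted hm
      have hget : PySem.List.pyGetD order (p : Int) 0 = rh := pyGetD_of_drop hdrop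
      simp only [List.map_cons, solutionLoopA, solutionLoopB, hm, hmax2, hget, ← hnum]
      by_cases heq : num = rh
      · simp only [if_pos heq]
        by_cases hloc : i = location
        · simp [hloc]
        · simp only [if_neg hloc]
          have hdrop' : order.drop (p + 1) = rt := by
            rw [← List.drop_drop, hdrop]
            rfl
          have hperm' : (qs.map (fun j => PySem.List.pyGetD priorities j 0)).Perm rt := by
            have h2 := hperm
            rw [List.map_cons, ← hnum, heq] at h2
            exact h2.cons_inv
          have h3 := ih qs (p + 1) rt hdrop' hperm' (List.pairwise_cons.mp hsorted).2
          push_cast at h3 ⊢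
          exact h3
      · simp only [if_neg heq]
        have hperm' : ((qs ++ [i]).map (fun j => PySem.List.pyGetD priorities j 0)).Perm (rh :: rt) := by
          refine List.Perm.trans ?_ hperm
          simp only [List.map_append, List.map_cons, List.map_nil, ← hnum]
          exact List.perm_append_singleton _ _
        have h4 := ih (qs ++ [i]) p (rh :: rt) hdrop hperm' hsorted
        simpa [List.map_append, ← hnum] using h4

-- ===== VERDICT (by name: the statement is the Claim_ definition above) =====
theorem solution_spec : Claim_equal_solution := by
  intro priorities location _
  unfold Spec_solution solution solution_alt
  have hperm0 : ((PySem.List.pyRange 0 (PySem.List.len priorities) 1).map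
      (fun i => PySem.List.pyGetD priorities i 0)).Perm (PySem.List.sorted priorities (fun x => x) true) := by
    rw [PySem.List.map_pyGetD_pyRange_zero priorities 0]
    exact (PySem.List.sorted_perm priorities (fun x => x) true).symm
  have key := lockstep priorities (PySem.List.sorted priorities (fun x => x) true) location
    (priorities.length * priorities.length + priorities.length + 1)
    (PySem.List.pyRange 0 (PySem.List.len priorities) 1) 0
    (PySem.List.sorted priorities (fun x => x) true) rfl hperm0
    (PySem.List.sorted_pairwise_rev priorities (fun x => x))
  rw [PySem.List.enumerate_eq_map_pyRange priorities 0]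
  simpa using key
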